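-- pv_equiv track=rewrite | github.com/AfricanGiaNT/farming-guide2 | scripts/crop_advisor/recommendation_engine.py | _is_month_close_to_window
-- ===== SOURCE A (Python) =====
-- from typing import Dict, List, Any, Optional, Tuple
--
-- def _is_month_close_to_window(current_month: str, window_months: List[str]) -> bool:
--     """
--     Check if current month is close to planting window.
--
--     Args:
--         current_month: Current month
--         window_months: Months in planting window
--
--     Returns:
--         True if close to window
--     """
--     months = [
--         'January', 'February', 'March', 'April', 'May', 'June',
--         'July', 'August', 'September', 'October', 'November', 'December'
--     ]
--
--     try:
--         current_idx = months.index(current_month)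
--         window_indices = [months.index(month) for month in window_months if month in months]
--
--         # Check if within 1-2 months of window
--         for window_idx in window_indices:
--             if abs(current_idx - window_idx) <= 2:
--                 return True
--             # Handle year boundary
--             if abs(current_idx - window_idx) >= 10:  # Across year boundary
--                 return True
--
--         return False
--     except ValueError:
--         return False
-- ===== SOURCE B (Python) =====
-- def _is_month_close_to_window(current_month, window_months):
--     months = [
--         'January', 'February', 'March', 'April', 'May', 'June',
--         'July', 'August', 'September', 'October', 'November', 'December'
--     ]
--     if current_month not in months:
--         return False
--     ci = months.index(current_month)
--     close = {months[(ci + d) % 12] for d in range(-2, 3)}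
--     return any(m in close for m in window_months)
-- ===== Notes on version B (the rewrite author's own statement) =====
-- stated objective: alternative
-- what changed: Replaces A's per-window-month abs-distance test with its year-boundary special case by precomputing the set of the five month names within circular distance 2 of the current month and testing each window month for plain membership in that set.
import Mathlib
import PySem

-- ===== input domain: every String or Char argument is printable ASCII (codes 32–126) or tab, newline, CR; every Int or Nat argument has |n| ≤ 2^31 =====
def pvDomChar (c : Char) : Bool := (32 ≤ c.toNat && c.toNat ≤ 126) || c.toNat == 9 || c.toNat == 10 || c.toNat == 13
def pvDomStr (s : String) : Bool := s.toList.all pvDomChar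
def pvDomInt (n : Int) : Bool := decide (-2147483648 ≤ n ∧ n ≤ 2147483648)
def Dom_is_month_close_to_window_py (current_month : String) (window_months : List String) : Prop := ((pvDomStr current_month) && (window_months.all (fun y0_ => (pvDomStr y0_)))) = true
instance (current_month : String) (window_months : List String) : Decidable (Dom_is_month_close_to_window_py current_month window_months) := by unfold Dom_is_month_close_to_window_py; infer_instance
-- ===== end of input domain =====

-- B replaces the two-branch absolute-distance test per window month by one precomputed
-- circular neighborhood set of month names and a plain membership scan (alternative decomposition).

-- ===== PORT A =====
def pvMonths : List String :=
  ["January", "February", "March", "April", "May", "June",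
   "July", "August", "September", "October", "November", "December"]

-- literal port of A: try months.index(current_month) (none = ValueError → except branch
-- returns False); window_indices via filter+map; loop with early return = List.any
def is_month_close_to_window_py (current_month : String) (window_months : List String) : Bool :=
  match PySem.List.index? pvMonths current_month with
  | none => false
  | some current_idx =>
    let window_indices : List Nat :=
      (window_months.filter (fun month => pvMonths.contains month)).map
        (fun month => (PySem.List.index? pvMonths month).getD 0)
    window_indices.any (fun window_idx =>
      decide (((current_idx : Int) - (window_idx : Int)).natAbs ≤ 2) ||
      decide (10 ≤ ((current_idx : Int) - (window_idx : Int)).natAbs))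

-- ===== PORT B =====
-- B-side helper: the set comprehension {months[(ci+d)%12] for d in range(-2,3)}
def pvCloseSet (ci : Nat) : PySem.Set String :=
  PySem.Set.ofList ((PySem.List.pyRange (-2) 3 1).map
    (fun d => PySem.List.pyGetD pvMonths (PySem.Int.mod ((ci : Int) + d) 12) ""))

def is_month_close_to_window_py_alt (current_month : String) (window_months : List String) : Bool :=
  if pvMonths.contains current_month then
    let ci : Nat := (PySem.List.index? pvMonths current_month).getD 0
    let close : PySem.Set String := pvCloseSet ci
    window_months.any (fun m => PySem.Set.contains close m)
  else false

-- ===== PRECONDITION & SPEC =====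
def Spec_is_month_close_to_window_py (current_month : String) (window_months : List String) (out : Bool) : Prop := out = is_month_close_to_window_py_alt current_month window_months
instance (current_month : String) (window_months : List String) (out : Bool) : Decidable (Spec_is_month_close_to_window_py current_month window_months out) := by unfold Spec_is_month_close_to_window_py; infer_instance

-- ===== CLAIM (what is proved, stated in full; the proofs are below) =====
def Claim_equal_is_month_close_to_window_py : Prop := ∀ (current_month : String) (window_months : List String), Dom_is_month_close_to_window_py current_month window_months → Spec_is_month_close_to_window_py current_month window_months (is_month_close_to_window_py current_month window_months)

-- ===== LEMMAS AND PROOFS =====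

-- A's per-window-month test, as a function of the two indices
def pvCondA (ci wi : Nat) : Bool :=
  decide (((ci : Int) - (wi : Int)).natAbs ≤ 2) || decide (10 ≤ ((ci : Int) - (wi : Int)).natAbs)

-- finite check: for every current index and every valid month name, A's filtered
-- distance test agrees with membership in B's neighborhood set
lemma pv_mem_table :
    ((List.range 12).all fun ci => pvMonths.all fun m =>
      (pvMonths.contains m && pvCondA ci ((PySem.List.index? pvMonths m).getD 0))
        == PySem.Set.contains (pvCloseSet ci) m) = true := by decide

-- finite check: B's neighborhood set only contains month names
lemma pv_close_sub :
    ((List.range 12).all fun ci => (pvCloseSet ci).all fun x => pvMonths.contains x) = true := by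
  decide

lemma pv_pointwise (ci : Nat) (hci : ci < 12) (m : String) :
    (pvMonths.contains m && pvCondA ci ((PySem.List.index? pvMonths m).getD 0))
      = PySem.Set.contains (pvCloseSet ci) m := by
  by_cases hm : m ∈ pvMonths
  · have h := List.all_eq_true.mp pv_mem_table ci (List.mem_range.mpr hci)
    have h2 := List.all_eq_true.mp h m hm
    exact eq_of_beq h2
  · have hnc : m ∉ pvCloseSet ci := fun hin => hm (by
      have hsub := List.all_eq_true.mp pv_close_sub ci (List.mem_range.mpr hci)
      simpa [List.contains_eq_mem] using List.all_eq_true.mp hsub m hin)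
    simp [PySem.Set.contains, List.contains_eq_mem, hm, hnc]

lemma pv_any (ci : Nat) (hci : ci < 12) (ws : List String) :
    (((ws.filter (fun m => pvMonths.contains m)).map
        (fun m => (PySem.List.index? pvMonths m).getD 0)).any (pvCondA ci))
      = ws.any (fun m => PySem.Set.contains (pvCloseSet ci) m) := by
  induction ws with
  | nil => rfl
  | cons m t ih =>
    by_cases hp : pvMonths.contains m = true
    · simp only [List.filter_cons, hp, if_pos, List.map_cons, List.any_cons, ih]
      rw [← pv_pointwise ci hci m, hp, Bool.true_and]
    · have hpf : pvMonths.contains m = false := by simpa using hp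
      have := pv_pointwise ci hci m
      rw [hpf, Bool.false_and] at this
      simp only [List.filter_cons, hpf, Bool.false_eq_true, if_false, ih,
        List.any_cons, ← this, Bool.false_or]

-- ===== VERDICT (by name: the statement is the Claim_ definition above) =====
theorem is_month_close_to_window_py_spec : Claim_equal_is_month_close_to_window_py := by
  intro cm ws _
  unfold Spec_is_month_close_to_window_py is_month_close_to_window_py is_month_close_to_window_py_alt
  cases h : PySem.List.index? pvMonths cm with
  | none =>
    rw [PySem.List.index?_eq_idxOf?] at h
    have : cm ∉ pvMonths := List.idxOf?_eq_none_iff.mp h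
    simp [List.contains_eq_mem, this]
  | some ci =>
    obtain ⟨hk, heq, -⟩ := PySem.List.getElem_of_index?_eq_some h
    have hmem : cm ∈ pvMonths := heq ▸ List.getElem_mem hk
    have hci : ci < 12 := by simpa [pvMonths] using hk
    have hcontains : pvMonths.contains cm = true := by simp [List.contains_eq_mem, hmem]
    simp only [hcontains, if_pos, Option.getD_some]
    exact pv_any ci hci ws
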